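-- pv_equiv track=rewrite | github.com/8agana/Federation | System/Memory/3_MemoryMCPs/nerve_center_unified/nerve_center_mcp.py | parse_note_content
-- ===== SOURCE A (Python) =====
-- from typing import Optional, Dict, Any, List
--
-- def parse_note_content(content: str) -> Dict[str, Any]:
--     """Parse note content to extract observations and relations"""
--     lines = content.split('\n')
--     observations = []
--     relations = []
--
--     current_section = None
--
--     for line in lines:
--         line = line.strip()
--
--         if line == "## Observations":
--             current_section = "observations"
--         elif line == "## Relations":
--             current_section = "relations"
--         elif line.startswith("### ") and current_section == "observations":
--             # Start of an observation category
--             category = line[4:]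
--             observations.append({"category": category, "items": []})
--         elif line.startswith("- ") and current_section == "observations" and observations:
--             # Observation item
--             observations[-1]["items"].append(line[2:])
--         elif line.startswith("- ") and current_section == "relations":
--             # Relation item
--             if " -> " in line:
--                 parts = line[2:].split(" -> ", 1)
--                 if len(parts) == 2:
--                     relation_type, target = parts
--                     relations.append({
--                         "type": relation_type.strip(),
--                         "target": target.strip()
--                     })
--
--     return {
--         "observations": observations,
--         "relations": relations
--     }
-- ===== SOURCE B (Python) =====
-- def parse_note_content(content: str) -> dict:
--     """Parse note content to extract observations and relations (block-partition decomposition)."""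
--     # Phase 1: partition stripped lines into tagged section blocks.
--     blocks = []
--     kind = None
--     buf = []
--     for raw in content.split('\n'):
--         line = raw.strip()
--         if line == "## Observations" or line == "## Relations":
--             if kind is not None:
--                 blocks.append((kind, buf))
--             kind = "observations" if line == "## Observations" else "relations"
--             buf = []
--         else:
--             buf.append(line)
--     if kind is not None:
--         blocks.append((kind, buf))
--
--     # Phase 2: process each block with a type-specific routine, accumulating
--     # into shared lists so repeated sections accumulate correctly.
--     observations = []
--     relations = []
--     for k, ls in blocks:
--         if k == "observations":
--             _obs_block(ls, observations)
--         else: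
--             _rel_block(ls, relations)
--     return {"observations": observations, "relations": relations}
--
--
-- def _obs_block(ls, observations):
--     for line in ls:
--         if line.startswith("### "):
--             observations.append({"category": line[4:], "items": []})
--         elif line.startswith("- ") and observations:
--             observations[-1]["items"].append(line[2:])
--
--
-- def _rel_block(ls, relations):
--     for line in ls:
--         if line.startswith("- ") and " -> " in line:
--             parts = line[2:].split(" -> ", 1)
--             if len(parts) == 2:
--                 relations.append({"type": parts[0].strip(), "target": parts[1].strip()})
-- ===== Notes on version B (the rewrite author's own statement) =====
-- stated objective: alternative
-- what changed: Replaces A's single stateful pass (a current_section flag consulted by every branch) by a two-phase decomposition: one pass partitions the stripped lines into tagged section blocks, then each block is handed to a type-specific routine (observation categories/items vs relation bullets) that appends into the shared result lists.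
import Mathlib
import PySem

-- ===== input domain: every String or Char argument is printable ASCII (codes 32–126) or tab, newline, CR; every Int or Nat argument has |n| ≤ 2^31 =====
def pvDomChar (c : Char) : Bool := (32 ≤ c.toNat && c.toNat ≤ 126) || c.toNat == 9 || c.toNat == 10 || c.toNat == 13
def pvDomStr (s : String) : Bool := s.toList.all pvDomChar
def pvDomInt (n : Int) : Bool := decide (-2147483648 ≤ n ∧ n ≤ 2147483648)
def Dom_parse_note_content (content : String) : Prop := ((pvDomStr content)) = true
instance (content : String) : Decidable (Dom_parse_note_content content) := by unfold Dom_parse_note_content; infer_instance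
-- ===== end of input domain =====

-- B replaces A's single stateful pass by a partition into tagged section blocks followed by
-- type-specific per-block routines (objective: alternative decomposition, same cost).

-- shared rendering of an observation dict {"category": c, "items": [...]} into the required
-- inner type (its "items" list value has no direct home in List (String × String))
def pvObsOut (o : String × List String) : List (String × String) :=
  ("category", o.1) :: o.2.map (fun i => ("item", i))

-- ===== PORT A =====
-- A's per-line step: state = (current_section, observations, relations)
def pvStepA (st : Option String × List (String × List String) × List (List (String × String)))
    (raw : String) : Option String × List (String × List String) × List (List (String × String)) :=
  let line := PySem.Str.strip raw
  let cs := st.1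
  let obs := st.2.1
  let rels := st.2.2
  if line = "## Observations" then (some "observations", obs, rels)
  else if line = "## Relations" then (some "relations", obs, rels)
  else if PySem.Str.startswith line "### " = true ∧ cs = some "observations" then
    (cs, obs ++ [(PySem.Str.slice line (some 4) none, [])], rels)
  else if PySem.Str.startswith line "- " = true ∧ cs = some "observations" ∧ obs ≠ [] then
    (cs, (match obs.getLast? with
          | some l => obs.dropLast ++ [(l.1, l.2 ++ [PySem.Str.slice line (some 2) none])]
          | none => obs), rels)
  else if PySem.Str.startswith line "- " = true ∧ cs = some "relations" then
    (if PySem.Str.isIn " -> " line = true then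
       match PySem.Str.splitMax? (PySem.Str.slice line (some 2) none) " -> " 1 with
       | some [rt, tg] =>
           (cs, obs, rels ++ [[("type", PySem.Str.strip rt), ("target", PySem.Str.strip tg)]])
       | _ => (cs, obs, rels)
     else (cs, obs, rels))
  else st

def parse_note_content (content : String) : List (String × List (List (String × String))) :=
  let lines := (PySem.Str.split? content "\n").getD []
  let st := lines.foldl pvStepA (none, [], [])
  [("observations", st.2.1.map pvObsOut), ("relations", st.2.2)]

-- ===== PORT B =====
-- phase 1 per-line step: state = (kind, buf, blocks)
def pvStepP (st : Option String × List String × List (String × List String))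
    (raw : String) : Option String × List String × List (String × List String) :=
  let line := PySem.Str.strip raw
  if line = "## Observations" ∨ line = "## Relations" then
    ((if line = "## Observations" then some "observations" else some "relations"),
     [],
     (match st.1 with | some k => st.2.2 ++ [(k, st.2.1)] | none => st.2.2))
  else (st.1, st.2.1 ++ [line], st.2.2)

def pvBlocks (lines : List String) : List (String × List String) :=
  let s := lines.foldl pvStepP (none, [], [])
  match s.1 with
  | some k => s.2.2 ++ [(k, s.2.1)]
  | none => s.2.2

def pvObsLine (obs : List (String × List String)) (line : String) : List (String × List String) :=
  if PySem.Str.startswith line "### " = true then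
    obs ++ [(PySem.Str.slice line (some 4) none, [])]
  else if PySem.Str.startswith line "- " = true ∧ obs ≠ [] then
    match obs.getLast? with
    | some l => obs.dropLast ++ [(l.1, l.2 ++ [PySem.Str.slice line (some 2) none])]
    | none => obs
  else obs

def pvRelLine (rels : List (List (String × String))) (line : String) : List (List (String × String)) :=
  if PySem.Str.startswith line "- " = true ∧ PySem.Str.isIn " -> " line = true then
    match PySem.Str.splitMax? (PySem.Str.slice line (some 2) none) " -> " 1 with
    | some [rt, tg] => rels ++ [[("type", PySem.Str.strip rt), ("target", PySem.Str.strip tg)]]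
    | _ => rels
  else rels

def pvApplyBlock (st : List (String × List String) × List (List (String × String)))
    (b : String × List String) :
    List (String × List String) × List (List (String × String)) :=
  if b.1 = "observations" then (b.2.foldl pvObsLine st.1, st.2)
  else (st.1, b.2.foldl pvRelLine st.2)

def parse_note_content_alt (content : String) : List (String × List (List (String × String))) :=
  let st := (pvBlocks ((PySem.Str.split? content "\n").getD [])).foldl pvApplyBlock ([], [])
  [("observations", st.1.map pvObsOut), ("relations", st.2)]

-- ===== PRECONDITION & SPEC =====
def Spec_parse_note_content (content : String) (out : List (String × List (List (String × String)))) : Prop :=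
  out = parse_note_content_alt content
instance (content : String) (out : List (String × List (List (String × String)))) :
    Decidable (Spec_parse_note_content content out) := by unfold Spec_parse_note_content; infer_instance

-- ===== CLAIM (what is proved, stated in full; the proofs are below) =====
def Claim_equal_parse_note_content : Prop := ∀ (content : String), Dom_parse_note_content content →
  Spec_parse_note_content content (parse_note_content content)

-- ===== LEMMAS AND PROOFS =====

-- proof-only: the pending buffer of phase 1, applied to the accumulated state
def pvApplyOpt (k : Option String)
    (st : List (String × List String) × List (List (String × String)))
    (buf : List String) : List (String × List String) × List (List (String × String)) :=
  match k with
  | some k' => pvApplyBlock st (k', buf)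
  | none => st

-- proof-only: the block flushed when a header arrives (mirrors the inline match in pvStepP)
def pvFlush (k : Option String) (buf : List String) : List (String × List String) :=
  match k with
  | some k' => [(k', buf)]
  | none => []

theorem pvBlocksShift (L : List String) (k : Option String) (buf : List String)
    (blocks : List (String × List String)) :
    L.foldl pvStepP (k, buf, blocks) =
      ((L.foldl pvStepP (k, buf, [])).1, (L.foldl pvStepP (k, buf, [])).2.1,
        blocks ++ (L.foldl pvStepP (k, buf, [])).2.2) := by
  induction L generalizing k buf blocks with
  | nil => simp
  | cons l L ih =>
    simp only [List.foldl_cons]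
    by_cases h : PySem.Str.strip l = "## Observations" ∨ PySem.Str.strip l = "## Relations"
    · simp only [pvStepP, h, if_true]
      cases k with
      | none =>
        simp only
        exact ih _ _ _
      | some k' =>
        simp only [List.nil_append]
        rw [ih _ _ (blocks ++ [(k', buf)]), ih _ _ ([(k', buf)])]
        simp [List.append_assoc]
    · simp only [pvStepP, h, if_false]
      exact ih _ _ _

set_option maxHeartbeats 1000000 in
theorem pvStepCompat (k : Option String)
    (st : List (String × List String) × List (List (String × String))) (buf : List String)
    (raw : String)
    (hk : k = none ∨ k = some "observations" ∨ k = some "relations")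
    (hO : PySem.Str.strip raw ≠ "## Observations")
    (hR : PySem.Str.strip raw ≠ "## Relations") :
    pvStepA (k, pvApplyOpt k st buf) raw =
      (k, pvApplyOpt k st (buf ++ [PySem.Str.strip raw])) := by
  rcases hk with rfl | rfl | rfl
  · simp [pvStepA, pvApplyOpt, hO, hR]
  · simp only [pvApplyOpt, pvApplyBlock, if_true, List.foldl_append, List.foldl_cons,
      List.foldl_nil, pvStepA, hO, hR, if_false]
    simp only [pvObsLine]
    split_ifs with h1 h2 <;> simp_all
  · simp only [pvApplyOpt, pvApplyBlock, pvStepA, hO, hR]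
    simp only [List.foldl_append, List.foldl_cons, List.foldl_nil, pvRelLine]
    rcases hsp : PySem.Str.splitMax? (PySem.Str.slice (PySem.Str.strip raw) (some 2)) " -> " 1
      with _ | ⟨_ | ⟨rt, _ | ⟨tg, _ | ⟨c, rest⟩⟩⟩⟩ <;> split_ifs <;> simp_all

theorem pvFoldMatch (F X : List (String × List String)) (o : Option String) (Y : List String)
    (st : List (String × List String) × List (List (String × String))) :
    List.foldl pvApplyBlock st
        (match o with | some k' => (F ++ X) ++ [(k', Y)] | none => F ++ X) =
      List.foldl pvApplyBlock (List.foldl pvApplyBlock st F)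
        (match o with | some k' => X ++ [(k', Y)] | none => X) := by
  cases o <;> simp [List.foldl_append]

set_option maxHeartbeats 1000000 in
theorem pvMain (L : List String) (k : Option String) (buf : List String)
    (st : List (String × List String) × List (List (String × String)))
    (hk : k = none ∨ k = some "observations" ∨ k = some "relations") :
    ((match (L.foldl pvStepP (k, buf, [])).1 with
      | some k' => (L.foldl pvStepP (k, buf, [])).2.2 ++ [(k', (L.foldl pvStepP (k, buf, [])).2.1)]
      | none => (L.foldl pvStepP (k, buf, [])).2.2).foldl pvApplyBlock st) =
      (L.foldl pvStepA (k, pvApplyOpt k st buf)).2 := by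
  induction L generalizing k buf st with
  | nil =>
    cases k with
    | none => simp [pvApplyOpt]
    | some k' => simp [pvApplyOpt]
  | cons l L ih =>
    simp only [List.foldl_cons]
    by_cases h : PySem.Str.strip l = "## Observations" ∨ PySem.Str.strip l = "## Relations"
    · have hstep : pvStepP (k, buf, []) l =
        ((if PySem.Str.strip l = "## Observations" then some "observations" else some "relations"),
          [], pvFlush k buf) := by
        cases k <;> simp [pvStepP, pvFlush, h]
      have hstepA : pvStepA (k, pvApplyOpt k st buf) l =
        ((if PySem.Str.strip l = "## Observations" then some "observations" else some "relations"),
          pvApplyOpt k st buf) := by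
        rcases h with h' | h' <;> simp [pvStepA, h']
      rw [hstep, hstepA, pvBlocksShift]
      have hk2' : (if PySem.Str.strip l = "## Observations" then (some "observations" : Option String)
            else some "relations") = none ∨
          (if PySem.Str.strip l = "## Observations" then (some "observations" : Option String)
            else some "relations") = some "observations" ∨
          (if PySem.Str.strip l = "## Observations" then (some "observations" : Option String)
            else some "relations") = some "relations" := by
        split_ifs <;> simp
      have happ : ∀ st', pvApplyOpt (if PySem.Str.strip l = "## Observations"
          then (some "observations" : Option String) else some "relations") st' [] = st' := by
        intro st'; split_ifs <;> simp [pvApplyOpt, pvApplyBlock]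
      rcases hk with rfl | rfl | rfl
      · have key := ih _ [] (List.foldl pvApplyBlock st (pvFlush none buf)) hk2'
        rw [happ] at key
        dsimp only
        rw [pvFoldMatch]
        simpa [pvFlush, pvApplyOpt, pvApplyBlock] using key
      · have key := ih _ [] (List.foldl pvApplyBlock st (pvFlush (some "observations") buf)) hk2'
        rw [happ] at key
        dsimp only
        rw [pvFoldMatch]
        simpa [pvFlush, pvApplyOpt, pvApplyBlock] using key
      · have key := ih _ [] (List.foldl pvApplyBlock st (pvFlush (some "relations") buf)) hk2'
        rw [happ] at key
        dsimp only
        rw [pvFoldMatch]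
        simpa [pvFlush, pvApplyOpt, pvApplyBlock] using key
    · push_neg at h
      have hstep : pvStepP (k, buf, []) l = (k, buf ++ [PySem.Str.strip l], []) := by
        simp [pvStepP, h.1, h.2]
      rw [hstep, ih k _ st hk, pvStepCompat k st buf l hk h.1 h.2]

-- ===== VERDICT (by name: the statement is the Claim_ definition above) =====
set_option maxHeartbeats 1000000 in
theorem parse_note_content_spec : Claim_equal_parse_note_content := by
  intro content _
  unfold Spec_parse_note_content parse_note_content parse_note_content_alt pvBlocks
  have := pvMain ((PySem.Str.split? content "\n").getD []) none [] ([], []) (Or.inl rfl)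
  simp only [pvApplyOpt] at this
  simp only [this]
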